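-- pv_equiv track=rewrite | github.com/supingisme/test | python/github/CppCode-Formatter/CodeFormatter.py | get_pos_with_space
-- ===== SOURCE A (Python) =====
-- def get_pos_with_space(pos, input_str):
--     non_space_count = -1
--     for idx in range(len(input_str)):
--         if input_str[idx] != ' ':
--             non_space_count += 1
--             if non_space_count == pos:
--                 return idx
--     else:
--         raise ValueError("位置错误。")
-- ===== SOURCE B (Python) =====
-- def get_pos_with_space(pos, input_str):
--     # prefix[k] = number of spaces among the first k characters
--     prefix = [0]
--     for c in input_str:
--         prefix.append(prefix[-1] + (c == ' '))
--     if pos < 0 or pos >= len(input_str) - prefix[-1]: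
--         raise ValueError("位置错误。")
--     # the answer idx is the least fixed point of idx -> pos + prefix[idx + 1];
--     # starting at pos, each jump skips past all spaces counted so far at once
--     idx = pos
--     while idx != pos + prefix[idx + 1]:
--         idx = pos + prefix[idx + 1]
--     return idx
-- ===== Notes on version B (the rewrite author's own statement) =====
-- stated objective: alternative
-- what changed: Replaces A's per-character counting scan with a prefix-sum table of space counts followed by a fixed-point 'skip-ahead' iteration idx -> pos + spaces_before(idx+1), whose least fixed point starting at pos is the index of the pos-th non-space character.
import Mathlib
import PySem

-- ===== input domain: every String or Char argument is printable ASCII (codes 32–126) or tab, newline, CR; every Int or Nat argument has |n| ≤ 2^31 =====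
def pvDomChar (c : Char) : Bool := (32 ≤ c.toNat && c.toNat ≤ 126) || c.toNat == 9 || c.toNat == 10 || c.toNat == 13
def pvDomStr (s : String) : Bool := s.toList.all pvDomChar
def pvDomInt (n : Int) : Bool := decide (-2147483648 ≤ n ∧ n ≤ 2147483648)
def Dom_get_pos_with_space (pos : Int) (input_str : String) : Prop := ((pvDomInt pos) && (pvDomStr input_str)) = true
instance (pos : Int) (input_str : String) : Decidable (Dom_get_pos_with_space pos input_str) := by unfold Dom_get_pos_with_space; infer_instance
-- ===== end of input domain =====

-- B replaces A's per-character counting scan with a prefix-sum table of space counts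
-- followed by a fixed-point skip-ahead iteration idx -> pos + prefix[idx+1]
-- (objective: alternative).

-- ===== PORT A =====
-- A's for-loop over range(len(input_str)) with the running non_space_count; the
-- final 'raise ValueError' branch is excluded by Pre_, value there is a dummy 0.
def pvA_loop (pos : Int) : List Char → Int → Int → Int
  | [], _, _ => 0
  | c :: rest, idx, cnt =>
    if c ≠ ' ' then
      if cnt + 1 = pos then idx else pvA_loop pos rest (idx + 1) (cnt + 1)
    else pvA_loop pos rest (idx + 1) cnt

def get_pos_with_space (pos : Int) (input_str : String) : Int :=
  pvA_loop pos input_str.toList 0 (-1)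

-- ===== PORT B =====
-- Source B's prefix-building for-loop: prefix.append(prefix[-1] + (c == ' ')).
-- prefix[-1] is ported as getLast! — exact, since the accumulator is never empty.
def pvPrefixStep (acc : List Int) (c : Char) : List Int :=
  acc ++ [acc.getLast! + (if c = ' ' then 1 else 0)]

-- Source B's 'while idx != pos + prefix[idx + 1]: idx = ...; return idx' loop, made
-- total with fuel (fuel len+1 suffices under Pre_, proved below; the fuel-exhausted
-- value is never reached there).
def pvB_iter (pos : Int) (pre : List Int) : Nat → Int → Int
  | 0, idx => idx
  | fuel + 1, idx =>
    let nxt := pos + (PySem.List.pyGet? pre (idx + 1)).getD 0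
    if idx = nxt then idx else pvB_iter pos pre fuel nxt

def get_pos_with_space_alt (pos : Int) (input_str : String) : Int :=
  let pre := input_str.toList.foldl pvPrefixStep [0]
  -- 'raise ValueError' branch, excluded by Pre_, value there is a dummy 0
  if pos < 0 ∨ (input_str.toList.length : Int) - pre.getLast! ≤ pos then 0
  else pvB_iter pos pre (input_str.toList.length + 1) pos

-- ===== PRECONDITION & SPEC =====
-- A raises ValueError exactly when pos is negative or ≥ the number of non-space
-- characters; those inputs are excluded.
def Pre_get_pos_with_space (pos : Int) (input_str : String) : Prop :=
  0 ≤ pos ∧ pos < ((input_str.toList.filter (fun c => c ≠ ' ')).length : Int)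
instance (pos : Int) (input_str : String) : Decidable (Pre_get_pos_with_space pos input_str) := by unfold Pre_get_pos_with_space; infer_instance

def pvWitness_get_pos_with_space : Int × String := (2, " a b c")

def Spec_get_pos_with_space (pos : Int) (input_str : String) (out : Int) : Prop := out = get_pos_with_space_alt pos input_str
instance (pos : Int) (input_str : String) (out : Int) : Decidable (Spec_get_pos_with_space pos input_str out) := by unfold Spec_get_pos_with_space; infer_instance

-- ===== CLAIM (what is proved, stated in full; the proofs are below) =====
def Claim_equal_get_pos_with_space : Prop := ∀ (pos : Int) (input_str : String), Dom_get_pos_with_space pos input_str → Pre_get_pos_with_space pos input_str → Spec_get_pos_with_space pos input_str (get_pos_with_space pos input_str)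

-- ===== LEMMAS AND PROOFS =====

-- number of spaces among the first k characters (the value prefix[k] holds)
def pvSp (cs : List Char) (k : Nat) : Int := ((cs.take k).count ' ' : Int)

-- index (offset by idx) of the k-th non-space character: common reference point
def pvFindNth : List Char → Nat → Int → Int
  | [], _, _ => 0
  | c :: rest, k, idx =>
    if c ≠ ' ' then (if k = 0 then idx else pvFindNth rest (k - 1) (idx + 1))
    else pvFindNth rest k (idx + 1)

lemma pvA_loop_eq_findNth (chars : List Char) (pos : Int) (idx cnt : Int)
    (h : cnt + 1 ≤ pos) :
    pvA_loop pos chars idx cnt = pvFindNth chars (pos - cnt - 1).toNat idx := by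
  induction chars generalizing idx cnt with
  | nil => simp [pvA_loop, pvFindNth]
  | cons c rest ih =>
    simp only [pvA_loop, pvFindNth]
    by_cases hc : c = ' '
    · rw [if_neg (by simp [hc]), if_neg (by simp [hc])]
      exact ih (idx + 1) cnt h
    · rw [if_pos hc, if_pos hc]
      by_cases he : cnt + 1 = pos
      · rw [if_pos he, if_pos (by omega)]
      · rw [if_neg he, if_neg (show ¬ (pos - cnt - 1).toNat = 0 by omega)]
        have hk : (pos - cnt - 1).toNat - 1 = (pos - (cnt + 1) - 1).toNat := by omega
        rw [hk]
        exact ih (idx + 1) (cnt + 1) (by omega)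

lemma pvGetLast!_range_map (g : Nat → Int) (n : Nat) :
    ((List.range (n + 1)).map g).getLast! = g n := by
  rw [List.range_succ, List.map_append]
  simp

lemma pvPrefix_foldl (rest : List Char) : ∀ done : List Char,
    rest.foldl pvPrefixStep ((List.range (done.length + 1)).map (pvSp done))
      = (List.range ((done ++ rest).length + 1)).map (pvSp (done ++ rest)) := by
  induction rest with
  | nil => intro done; simp
  | cons c rest ih =>
    intro done
    have hstep : pvPrefixStep ((List.range (done.length + 1)).map (pvSp done)) c
        = (List.range ((done ++ [c]).length + 1)).map (pvSp (done ++ [c])) := by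
      unfold pvPrefixStep
      rw [pvGetLast!_range_map]
      rw [show (done ++ [c]).length + 1 = (done.length + 1) + 1 by simp]
      rw [List.range_succ (n := done.length + 1), List.map_append]
      congr 1
      · apply List.map_congr_left
        intro k hk
        rw [List.mem_range] at hk
        unfold pvSp
        rw [List.take_append_of_le_length (by omega)]
      · simp only [List.map_cons, List.map_nil]
        congr 1
        unfold pvSp
        rw [show List.take (done.length + 1) (done ++ [c]) = done ++ [c] from
          List.take_of_length_le (by simp), List.count_append]
        by_cases hc : c = ' ' <;> simp [hc]
    rw [List.foldl_cons, hstep, ih (done ++ [c])]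
    simp
lemma pvPrefix_eq (cs : List Char) :
    cs.foldl pvPrefixStep [0] = (List.range (cs.length + 1)).map (pvSp cs) := by
  have h := pvPrefix_foldl cs []
  simpa [pvSp] using h

lemma pvSp_mono (cs : List Char) {a b : Nat} (h : a ≤ b) : pvSp cs a ≤ pvSp cs b := by
  unfold pvSp
  rw [show cs.take a = (cs.take b).take a by rw [List.take_take, Nat.min_eq_left h]]
  exact_mod_cast (List.take_sublist _ _).count_le _

lemma pvSp_nonneg (cs : List Char) (k : Nat) : 0 ≤ pvSp cs k := by
  unfold pvSp; positivity

lemma pvPrefix_get (cs : List Char) (t : Int) (h0 : 0 ≤ t) (h1 : t < (cs.length : Int) + 1) :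
    (PySem.List.pyGet? ((List.range (cs.length + 1)).map (pvSp cs)) t).getD 0
      = pvSp cs t.toNat := by
  have hlen : ((List.range (cs.length + 1)).map (pvSp cs)).length = cs.length + 1 := by simp
  have ht : t.toNat < cs.length + 1 := by omega
  have hle : t ≤ (cs.length : Int) := by omega
  simp [PySem.List.pyGet?, PySem.List.pyIdx?, hlen, h0, ht, hle, List.getElem?_map]

lemma pvFilter_count (l : List Char) :
    (l.filter (fun c => c ≠ ' ')).length + l.count ' ' = l.length := by
  induction l with
  | nil => simp
  | cons c r ih =>
    by_cases hc : c = ' ' <;> simp [hc, ← ih] <;> omega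

lemma pvFindNth_spec : ∀ (cs : List Char) (k : Nat) (idx : Int),
    k < (cs.filter (fun c => c ≠ ' ')).length →
    ∃ j : Nat, pvFindNth cs k idx = idx + (j : Int) ∧ j < cs.length ∧
      ((cs.take (j + 1)).filter (fun c => c ≠ ' ')).length = k + 1 ∧
      ∀ m : Nat, m < j → ((cs.take (m + 1)).filter (fun c => c ≠ ' ')).length ≤ k := by
  intro cs
  induction cs with
  | nil => intro k idx h; simp at h
  | cons c rest ih =>
    intro k idx h
    by_cases hc : c = ' '
    · rw [pvFindNth, if_neg (by simp [hc])]
      have h' : k < (rest.filter (fun c => c ≠ ' ')).length := by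
        simp only [ne_eq, decide_not] at h ⊢
        simpa [hc] using h
      obtain ⟨j', hj1, hj2, hj3, hj4⟩ := ih k (idx + 1) h'
      refine ⟨j' + 1, by rw [hj1]; push_cast; ring, by simpa using hj2, ?_, ?_⟩
      · simp only [ne_eq, decide_not] at hj3 ⊢
        simpa [hc] using hj3
      · intro m hm
        cases m with
        | zero => simp [hc]
        | succ m' =>
          have := hj4 m' (by omega)
          simp only [ne_eq, decide_not] at this ⊢
          simpa [hc] using this
    · rw [pvFindNth, if_pos hc]
      cases k with
      | zero =>
        refine ⟨0, by simp, by simp, by simp [hc], by omega⟩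
      | succ k' =>
        rw [if_neg (by omega)]
        have h' : k' < (rest.filter (fun c => c ≠ ' ')).length := by
          simp only [ne_eq, decide_not] at h ⊢
          simp [hc] at h
          omega
        obtain ⟨j', hj1, hj2, hj3, hj4⟩ := ih k' (idx + 1) h'
        refine ⟨j' + 1, ?_, by simpa using hj2, ?_, ?_⟩
        · rw [show k' + 1 - 1 = k' from rfl, hj1]; push_cast; ring
        · simp only [ne_eq, decide_not] at hj3 ⊢
          simp [hj3, hc]
        · intro m hm
          cases m with
          | zero => simp [hc]
          | succ m' =>
            have := hj4 m' (by omega)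
            simp only [ne_eq, decide_not] at this ⊢
            simp [hc]
            omega

lemma pvB_iter_correct (cs : List Char) (pos : Int) (j : Nat)
    (hpos : 0 ≤ pos)
    (hjn : j < cs.length)
    (hfix : (j : Int) = pos + pvSp cs (j + 1))
    (hmin : ∀ m : Nat, m < j → (m : Int) < pos + pvSp cs (m + 1)) :
    ∀ (fuel : Nat) (idx : Int), pos ≤ idx → idx ≤ (j : Int) → (j : Int) - idx < (fuel : Int) →
      pvB_iter pos ((List.range (cs.length + 1)).map (pvSp cs)) fuel idx = (j : Int) := by
  intro fuel
  induction fuel with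
  | zero => intro idx h1 h2 h3; simp at h3; omega
  | succ f ih =>
    intro idx h1 h2 h3
    have hidx0 : 0 ≤ idx := le_trans hpos h1
    have hget : (PySem.List.pyGet? ((List.range (cs.length + 1)).map (pvSp cs)) (idx + 1)).getD 0
        = pvSp cs (idx + 1).toNat := by
      apply pvPrefix_get cs (idx + 1) (by omega) (by omega)
    have htn : (idx + 1).toNat = idx.toNat + 1 := by omega
    have hidxc : (idx.toNat : Int) = idx := by omega
    have hle : idx ≤ pos + pvSp cs (idx + 1).toNat := by
      rcases lt_or_eq_of_le h2 with hlt | heq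
      · have := hmin idx.toNat (by omega)
        rw [hidxc, ← htn] at this
        omega
      · have hjt : (idx + 1).toNat = j + 1 := by omega
        rw [hjt]; omega
    simp only [pvB_iter, hget]
    by_cases he : idx = pos + pvSp cs (idx + 1).toNat
    · rw [if_pos he]
      rcases lt_or_eq_of_le h2 with hlt | heq
      · exfalso
        have := hmin idx.toNat (by omega)
        rw [hidxc, ← htn] at this
        omega
      · exact heq
    · rw [if_neg he]
      have hnxtle : pos + pvSp cs (idx + 1).toNat ≤ (j : Int) := by
        have hm : pvSp cs (idx + 1).toNat ≤ pvSp cs (j + 1) :=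
          pvSp_mono cs (by omega)
        omega
      exact ih (pos + pvSp cs (idx + 1).toNat) (by have := pvSp_nonneg cs (idx + 1).toNat; omega)
        hnxtle (by omega)

-- ===== VERDICT (by name: the statement is the Claim_ definition above) =====
theorem get_pos_with_space_spec : Claim_equal_get_pos_with_space := by
  intro pos s _ hpre
  obtain ⟨h0, hlt⟩ := hpre
  unfold Spec_get_pos_with_space get_pos_with_space
  set cs := s.toList with hcs
  -- A's loop is pvFindNth
  have hA : pvA_loop pos cs 0 (-1) = pvFindNth cs pos.toNat 0 := by
    have := pvA_loop_eq_findNth cs pos 0 (-1) (by omega)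
    simpa using this
  -- the characterisation of the answer j
  have hk : pos.toNat < (cs.filter (fun c => c ≠ ' ')).length := by omega
  obtain ⟨j, hj1, hj2, hj3, hj4⟩ := pvFindNth_spec cs pos.toNat 0 hk
  have htake : ∀ m : Nat, m + 1 ≤ cs.length → (cs.take (m + 1)).length = m + 1 := by
    intro m hm; simp [List.length_take]; omega
  have hfix : (j : Int) = pos + pvSp cs (j + 1) := by
    have hfc := pvFilter_count (cs.take (j + 1))
    rw [htake j (by omega), hj3] at hfc
    unfold pvSp
    omega
  have hmin : ∀ m : Nat, m < j → (m : Int) < pos + pvSp cs (m + 1) := by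
    intro m hm
    have hfc := pvFilter_count (cs.take (m + 1))
    rw [htake m (by omega)] at hfc
    have := hj4 m hm
    unfold pvSp
    omega
  -- B's guard is false
  have hsplast : (cs.foldl pvPrefixStep [0]).getLast! = pvSp cs cs.length := by
    rw [pvPrefix_eq, pvGetLast!_range_map]
  have hspn : pvSp cs cs.length = (cs.count ' ' : Int) := by
    unfold pvSp; rw [List.take_of_length_le (le_refl _)]
  have hguard : ¬ (pos < 0 ∨ (cs.length : Int) - (cs.foldl pvPrefixStep [0]).getLast! ≤ pos) := by
    have hfc := pvFilter_count cs
    rw [hsplast, hspn]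
    omega
  have hB : get_pos_with_space_alt pos s = (j : Int) := by
    unfold get_pos_with_space_alt
    show (if pos < 0 ∨ (cs.length : Int) - (cs.foldl pvPrefixStep [0]).getLast! ≤ pos then 0
      else pvB_iter pos (cs.foldl pvPrefixStep [0]) (cs.length + 1) pos) = (j : Int)
    rw [if_neg hguard, pvPrefix_eq]
    exact pvB_iter_correct cs pos j h0 hj2 hfix hmin (cs.length + 1) pos (le_refl _)
      (by have := pvSp_nonneg cs (j + 1); omega) (by push_cast; omega)
  rw [hA, hj1, hB]
  omega
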